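-- pv_equiv track=rewrite | github.com/russellgoldstein/mlb-scripts | analyze_streaks.py | games_in_season
-- ===== SOURCE A (Python) =====
-- SEASON_GAME_PHASES = (
--     (1900, 140),
--     (1904, 154),
--     (1919, 140),
--     (1920, 154),
--     (1962, 162),
-- )
--
-- def games_in_season(season: int) -> int:
--     games = SEASON_GAME_PHASES[0][1]
--     for start_year, total_games in SEASON_GAME_PHASES:
--         if season >= start_year:
--             games = total_games
--         else:
--             break
--     return games
-- ===== SOURCE B (Python) =====
-- import bisect
--
-- SEASON_GAME_PHASES = (
--     (1900, 140),
--     (1904, 154),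
--     (1919, 140),
--     (1920, 154),
--     (1962, 162),
-- )
--
-- _START_YEARS = [p[0] for p in SEASON_GAME_PHASES]
-- _GAME_COUNTS = [p[1] for p in SEASON_GAME_PHASES]
--
-- def games_in_season(season: int) -> int:
--     idx = bisect.bisect_right(_START_YEARS, season)
--     return _GAME_COUNTS[max(0, idx - 1)]
-- ===== Notes on version B (the rewrite author's own statement) =====
-- stated objective: idiomatic
-- what changed: Replaces the phase-by-phase linear scan with a binary search (bisect_right) over the sorted phase start years, indexing a parallel counts list with the clamped insertion index.
import Mathlib
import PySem

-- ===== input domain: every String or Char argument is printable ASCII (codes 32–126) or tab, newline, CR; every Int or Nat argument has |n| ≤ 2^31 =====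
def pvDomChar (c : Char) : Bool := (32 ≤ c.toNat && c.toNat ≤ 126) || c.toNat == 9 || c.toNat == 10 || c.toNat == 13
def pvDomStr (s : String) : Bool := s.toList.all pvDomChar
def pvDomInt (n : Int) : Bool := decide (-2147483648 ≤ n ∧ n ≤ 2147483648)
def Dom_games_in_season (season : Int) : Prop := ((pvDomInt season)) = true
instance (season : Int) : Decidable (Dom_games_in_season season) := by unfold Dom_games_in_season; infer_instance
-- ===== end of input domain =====

-- B replaces A's phase-by-phase scan-with-break by a bisect_right binary search over
-- the sorted start years, indexing a parallel counts list (idiomatic; same exact values).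

-- ===== PORT A =====
-- the phases tuple, as a list of pairs
def seasonGamePhases : List (Int × Int) :=
  [(1900, 140), (1904, 154), (1919, 140), (1920, 154), (1962, 162)]

-- A's for-loop with break: recurse over the phase list carrying 'games'
def gamesLoopA (season : Int) (games : Int) : List (Int × Int) → Int
  | [] => games
  | (startYear, totalGames) :: rest =>
      if season ≥ startYear then gamesLoopA season totalGames rest else games

def games_in_season (season : Int) : Int :=
  gamesLoopA season ((seasonGamePhases.getD 0 (0, 0)).2) seasonGamePhases

-- ===== PORT B =====
def startYearsB : List Int := [1900, 1904, 1919, 1920, 1962]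
def gameCountsB : List Int := [140, 154, 140, 154, 162]

-- bisect.bisect_right: binary search for the insertion index (lo, hi are Nat indices)
def bisectRight (xs : List Int) (x : Int) (lo hi : Nat) : Nat :=
  if _h : lo < hi then
    let mid := (lo + hi) / 2
    if x < xs.getD mid 0 then bisectRight xs x lo mid
    else bisectRight xs x (mid + 1) hi
  else lo
termination_by hi - lo
decreasing_by all_goals omega

def games_in_season_alt (season : Int) : Int :=
  let idx := bisectRight startYearsB season 0 startYearsB.length
  gameCountsB.getD (max 0 (idx - 1)) 0

-- ===== PRECONDITION & SPEC =====
def Spec_games_in_season (season : Int) (out : Int) : Prop := out = games_in_season_alt season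
instance (season : Int) (out : Int) : Decidable (Spec_games_in_season season out) := by unfold Spec_games_in_season; infer_instance

-- ===== CLAIM (what is proved, stated in full; the proofs are below) =====
def Claim_equal_games_in_season : Prop := ∀ (season : Int), Dom_games_in_season season → Spec_games_in_season season (games_in_season season)

-- ===== LEMMAS AND PROOFS =====

-- ===== VERDICT (by name: the statement is the Claim_ definition above) =====
theorem games_in_season_spec : Claim_equal_games_in_season := by
  intro s _
  show games_in_season s = games_in_season_alt s
  rcases lt_or_ge s 1900 with h | h0
  · have a1 : s < 1904 := by omega
    have a2 : s < 1919 := by omega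
    have a3 : ¬ (1900 : Int) ≤ s := by omega
    simp [games_in_season, games_in_season_alt, gamesLoopA, bisectRight,
      seasonGamePhases, startYearsB, gameCountsB, h, a1, a2, a3]
  · rcases lt_or_ge s 1904 with h | h1
    · have a1 : (1900 : Int) ≤ s := h0
      have a2 : s < 1919 := by omega
      have a3 : ¬ s < 1900 := by omega
      simp [games_in_season, games_in_season_alt, gamesLoopA, bisectRight,
        seasonGamePhases, startYearsB, gameCountsB, h, a1, a2, a3]
    · rcases lt_or_ge s 1919 with h | h2
      · have a1 : (1900 : Int) ≤ s := h0
        have a2 : (1904 : Int) ≤ s := h1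
        have a3 : ¬ s < 1904 := by omega
        simp [games_in_season, games_in_season_alt, gamesLoopA, bisectRight,
          seasonGamePhases, startYearsB, gameCountsB, h, a1, a2, a3]
      · rcases lt_or_ge s 1920 with h | h3
        · have a1 : (1900 : Int) ≤ s := h0
          have a2 : (1904 : Int) ≤ s := h1
          have a3 : (1919 : Int) ≤ s := h2
          have a4 : ¬ s < 1919 := by omega
          have a5 : s < 1962 := by omega
          simp [games_in_season, games_in_season_alt, gamesLoopA, bisectRight,
            seasonGamePhases, startYearsB, gameCountsB, h, a1, a2, a3, a4, a5]
        · rcases lt_or_ge s 1962 with h | h4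
          · have a1 : (1900 : Int) ≤ s := h0
            have a2 : (1904 : Int) ≤ s := h1
            have a3 : (1919 : Int) ≤ s := h2
            have a4 : (1920 : Int) ≤ s := h3
            have a5 : ¬ s < 1919 := by omega
            have a6 : ¬ s < 1920 := by omega
            simp [games_in_season, games_in_season_alt, gamesLoopA, bisectRight,
              seasonGamePhases, startYearsB, gameCountsB, h, a1, a2, a3, a4, a5, a6]
          · have a1 : (1900 : Int) ≤ s := h0
            have a2 : (1904 : Int) ≤ s := h1
            have a3 : (1919 : Int) ≤ s := h2
            have a4 : (1920 : Int) ≤ s := h3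
            have a5 : (1962 : Int) ≤ s := h4
            have a6 : ¬ s < 1919 := by omega
            have a7 : ¬ s < 1962 := by omega
            simp [games_in_season, games_in_season_alt, gamesLoopA, bisectRight,
              seasonGamePhases, startYearsB, gameCountsB, a1, a2, a3, a4, a5, a6, a7]
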